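-- pv_equiv track=rewrite | github.com/odormond/adventofcode | 2020/7/seven.py | colour_containers
-- ===== SOURCE A (Python) =====
-- def colour_containers(colour, rules):
--     # Direct containment
--     containers = {container for container, bags in rules.items() if colour in bags}
--     # Indirect containment
--     while True:
--         indirect = set()
--         for inner in containers:
--             for container, bags in rules.items():
--                 if inner in bags and container not in containers:
--                     indirect.add(container)
--         containers.update(indirect)
--         if not indirect:
--             break
--     return containers
-- ===== SOURCE B (Python) =====
-- def colour_containers(colour, rules):
--     # Reverse-graph + breadth-first search by levels: build a bag -> containers
--     # index once, then expand only the newly discovered frontier each round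
--     # (instead of A's repeated rescans of all rules against all found containers).
--     rev = {}
--     for container, bags in rules.items():
--         for bag in bags:
--             rev.setdefault(bag, []).append(container)
--     seen = set()
--     frontier = [colour]
--     while frontier:
--         new = []
--         for inner in frontier:
--             for container in rev.get(inner, ()):
--                 if container not in seen:
--                     seen.add(container)
--                     new.append(container)
--         frontier = new
--     return seen
-- ===== Notes on version B (the rewrite author's own statement) =====
-- stated objective: alternative
-- what changed: A repeatedly rescans every rule for every already-found container until a fixpoint; B instead builds a reverse (bag -> containers) index once and expands only the newly discovered frontier of a breadth-first search from the colour.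
import Mathlib
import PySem

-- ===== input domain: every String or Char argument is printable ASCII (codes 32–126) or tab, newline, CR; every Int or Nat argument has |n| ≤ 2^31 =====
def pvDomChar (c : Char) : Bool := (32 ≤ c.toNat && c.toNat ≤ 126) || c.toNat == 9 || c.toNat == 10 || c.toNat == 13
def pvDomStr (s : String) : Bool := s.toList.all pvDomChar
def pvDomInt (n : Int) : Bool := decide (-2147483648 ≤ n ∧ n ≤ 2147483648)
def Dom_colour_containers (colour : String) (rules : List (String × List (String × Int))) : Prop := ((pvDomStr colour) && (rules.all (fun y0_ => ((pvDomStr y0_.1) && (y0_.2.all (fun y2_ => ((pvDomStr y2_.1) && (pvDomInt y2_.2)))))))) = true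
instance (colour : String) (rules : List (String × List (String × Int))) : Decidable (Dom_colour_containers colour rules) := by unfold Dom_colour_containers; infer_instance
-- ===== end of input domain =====

-- B replaces A's repeated full rescans of all rules against all found containers by a reverse
-- (bag -> containers) index built once plus a frontier-only breadth-first expansion
-- (objective: alternative algorithm; not measured faster).

-- ===== PORT A =====
-- `colour in bags`: membership among the keys of the bags dict
def pvHasKey (bags : List (String × Int)) (c : String) : Bool :=
  bags.any (fun q => q.1 == c)

-- one execution of the `while True` body: the `indirect` set collected from `containers`
def pvIndirect (rules : List (String × List (String × Int))) (containers : PySem.Set String) :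
    PySem.Set String :=
  containers.foldl
    (fun ind inner =>
      rules.foldl
        (fun ind p =>
          if pvHasKey p.2 inner && !(PySem.Set.contains containers p.1) then PySem.Set.add ind p.1
          else ind)
        ind)
    PySem.Set.empty

-- the `while True:` loop; the fuel is a totality device only: every round before the last adds
-- at least one rule key to `containers`, so rules.length + 1 rounds always reach the `break`
def pvLoopA (rules : List (String × List (String × Int))) :
    Nat → PySem.Set String → PySem.Set String
  | 0, containers => containers
  | fuel + 1, containers =>
    let indirect := pvIndirect rules containers
    let containers' := PySem.Set.update containers indirect
    if indirect.isEmpty then containers' else pvLoopA rules fuel containers'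

def colour_containers (colour : String) (rules : List (String × List (String × Int))) :
    List String :=
  let containers : PySem.Set String :=
    rules.foldl (fun s p => if pvHasKey p.2 colour then PySem.Set.add s p.1 else s)
      PySem.Set.empty
  pvLoopA rules (rules.length + 1) containers

-- ===== PORT B =====
-- rev.setdefault(bag, []).append(container), i.e. rev[bag] = rev.get(bag, []) + [container]
def pvRev (rules : List (String × List (String × Int))) : PySem.Dict String (List String) :=
  rules.foldl
    (fun d p => p.2.foldl (fun d q => d.modify q.1 [] (fun l => l ++ [p.1])) d)
    PySem.Dict.empty

-- one `while` body: scan the frontier, growing (seen, new)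
def pvBfsRound (rev : PySem.Dict String (List String)) (seen : PySem.Set String)
    (frontier : List String) : PySem.Set String × List String :=
  frontier.foldl
    (fun st inner =>
      (rev.getD inner []).foldl
        (fun st container =>
          if !(PySem.Set.contains st.1 container) then
            (PySem.Set.add st.1 container, st.2 ++ [container])
          else st)
        st)
    (seen, [])

-- the `while frontier:` loop; fuel is a totality device only (each round before the last adds
-- a new rule key to `seen`, so rules.length + 3 is never exhausted)
def pvLoopB (rev : PySem.Dict String (List String)) :
    Nat → PySem.Set String → List String → PySem.Set String
  | 0, seen, _ => seen
  | fuel + 1, seen, frontier =>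
    if frontier.isEmpty then seen
    else
      let st := pvBfsRound rev seen frontier
      pvLoopB rev fuel st.1 st.2

def colour_containers_alt (colour : String) (rules : List (String × List (String × Int))) :
    List String :=
  pvLoopB (pvRev rules) (rules.length + 3) PySem.Set.empty [colour]

-- ===== PRECONDITION & SPEC =====
def Spec_colour_containers (colour : String) (rules : List (String × List (String × Int))) (out : List String) : Prop := out = colour_containers_alt colour rules
instance (colour : String) (rules : List (String × List (String × Int))) (out : List String) : Decidable (Spec_colour_containers colour rules out) := by unfold Spec_colour_containers; infer_instance

-- ===== CLAIM (what is proved, stated in full; the proofs are below) =====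
def Claim_equal_colour_containers : Prop := ∀ (colour : String) (rules : List (String × List (String × Int))), Dom_colour_containers colour rules → Spec_colour_containers colour rules (colour_containers colour rules)

-- ===== LEMMAS AND PROOFS =====

-- push the sequence xs into the accumulator ind, skipping anything already in C or in ind:
-- the common shape of A's per-round collection and B's frontier scan
def pvSift (C ind xs : List String) : List String :=
  xs.foldl (fun ind x => if C.contains x || ind.contains x then ind else ind ++ [x]) ind

-- the containers A's inner scan offers for one `inner` (in rules order)
def pvACands (rules : List (String × List (String × Int))) (inner : String) : List String :=
  (rules.filter (fun p => pvHasKey p.2 inner)).map Prod.fst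

-- the list of containers one round adds, scanning the list F
def pvRnd (rules : List (String × List (String × Int))) (C F : List String) : List String :=
  F.foldl (fun ind inner => pvSift C ind (pvACands rules inner)) []

-- termination measure: rule keys not yet collected
def pvM (rules : List (String × List (String × Int))) (C : List String) : Nat :=
  ((rules.map Prod.fst).toFinset \ C.toFinset).card

theorem pv_add_eq (s : PySem.Set String) (x : String) :
    PySem.Set.add s x = if x ∈ s then s else s ++ [x] := by
  by_cases h : x ∈ s <;> simp [PySem.Set.add, PySem.Set.contains, h]

theorem pv_sift_nil (C ind : List String) : pvSift C ind [] = ind := rfl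

theorem pv_sift_cons (C ind : List String) (x : String) (xs : List String) :
    pvSift C ind (x :: xs) = pvSift C (if x ∈ C ∨ x ∈ ind then ind else ind ++ [x]) xs := by
  simp only [pvSift, List.foldl_cons]
  congr 1
  by_cases hc : x ∈ C <;> by_cases hi : x ∈ ind <;> simp [hc, hi]

theorem pv_sift_append (C ind xs ys : List String) :
    pvSift C ind (xs ++ ys) = pvSift C (pvSift C ind xs) ys := by
  simp [pvSift, List.foldl_append]

theorem pv_sift_mem_of_mem_ind (C : List String) {ind : List String} (xs : List String)
    {y : String} (h : y ∈ ind) : y ∈ pvSift C ind xs := by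
  induction xs generalizing ind with
  | nil => exact h
  | cons x xs ih =>
    rw [pv_sift_cons]
    split
    · exact ih h
    · exact ih (by simp [h])

theorem pv_sift_subset (C : List String) {ind xs : List String} {y : String}
    (h : y ∈ pvSift C ind xs) : y ∈ ind ∨ (y ∈ xs ∧ y ∉ C) := by
  induction xs generalizing ind with
  | nil => exact Or.inl h
  | cons x xs ih =>
    rw [pv_sift_cons] at h
    by_cases hc : x ∈ C ∨ x ∈ ind
    · rw [if_pos hc] at h
      rcases ih h with h' | h'
      · exact Or.inl h'
      · exact Or.inr ⟨List.mem_cons_of_mem _ h'.1, h'.2⟩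
    · rw [if_neg hc] at h
      rw [not_or] at hc
      rcases ih h with h' | h'
      · rcases List.mem_append.mp h' with h'' | h''
        · exact Or.inl h''
        · simp only [List.mem_singleton] at h''
          subst h''
          exact Or.inr ⟨List.mem_cons_self, hc.1⟩
      · exact Or.inr ⟨List.mem_cons_of_mem _ h'.1, h'.2⟩

theorem pv_sift_covered (C : List String) {xs : List String} (ind : List String)
    (h : ∀ x ∈ xs, x ∈ C) : pvSift C ind xs = ind := by
  induction xs generalizing ind with
  | nil => rfl
  | cons x xs ih =>
    rw [pv_sift_cons, if_pos (Or.inl (h x List.mem_cons_self))]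
    exact ih ind (fun z hz => h z (List.mem_cons_of_mem _ hz))

theorem pv_sift_mem_of_mem_xs (C : List String) {xs : List String} (ind : List String)
    {x : String} (h : x ∈ xs) : x ∈ C ∨ x ∈ pvSift C ind xs := by
  induction xs generalizing ind with
  | nil => simp at h
  | cons y ys ih =>
    rw [pv_sift_cons]
    rcases List.mem_cons.mp h with h' | h'
    · subst h'
      by_cases hC : x ∈ C
      · exact Or.inl hC
      · right
        by_cases hi : x ∈ ind
        · rw [if_pos (Or.inr hi)]
          exact pv_sift_mem_of_mem_ind C ys hi
        · rw [if_neg (by tauto)]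
          exact pv_sift_mem_of_mem_ind C ys (by simp)
    · exact ih _ h'

theorem pv_sift_nodup (C : List String) {ind : List String} (xs : List String)
    (h1 : ind.Nodup) (h2 : ∀ y ∈ ind, y ∉ C) :
    (pvSift C ind xs).Nodup ∧ ∀ y ∈ pvSift C ind xs, y ∉ C := by
  induction xs generalizing ind with
  | nil => exact ⟨h1, h2⟩
  | cons x xs ih =>
    rw [pv_sift_cons]
    by_cases hc : x ∈ C ∨ x ∈ ind
    · rw [if_pos hc]
      exact ih h1 h2
    · rw [if_neg hc]
      rw [not_or] at hc
      refine ih ?_ ?_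
      · simp only [List.nodup_append, List.nodup_singleton, true_and]
        refine ⟨h1, ?_⟩
        intro a ha b hb
        simp only [List.mem_singleton] at hb
        subst hb
        exact fun he => hc.2 (he ▸ ha)
      · intro y hy
        rcases List.mem_append.mp hy with h' | h'
        · exact h2 y h'
        · simp only [List.mem_singleton] at h'
          subst h'
          exact hc.1

theorem pv_acands_subset {rules : List (String × List (String × Int))} {inner x : String}
    (h : x ∈ pvACands rules inner) : x ∈ rules.map Prod.fst := by
  simp only [pvACands, List.mem_map] at h
  rcases h with ⟨p, hp, rfl⟩
  exact List.mem_map.mpr ⟨p, (List.mem_filter.mp hp).1, rfl⟩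

theorem pv_rnd_go_subset (rules : List (String × List (String × Int))) (C : List String)
    {F : List String} (ind0 : List String) {y : String}
    (h : y ∈ F.foldl (fun ind inner => pvSift C ind (pvACands rules inner)) ind0) :
    y ∈ ind0 ∨ (y ∉ C ∧ y ∈ rules.map Prod.fst) := by
  induction F generalizing ind0 with
  | nil => exact Or.inl h
  | cons f F ih =>
    simp only [List.foldl_cons] at h
    rcases ih _ h with h' | h'
    · rcases pv_sift_subset C h' with h'' | h''
      · exact Or.inl h''
      · exact Or.inr ⟨h''.2, pv_acands_subset h''.1⟩
    · exact Or.inr h'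

theorem pv_rnd_go_mono (rules : List (String × List (String × Int))) (C : List String)
    (F : List String) {ind0 : List String} {y : String} (h : y ∈ ind0) :
    y ∈ F.foldl (fun ind inner => pvSift C ind (pvACands rules inner)) ind0 := by
  induction F generalizing ind0 with
  | nil => exact h
  | cons f F ih => exact ih (pv_sift_mem_of_mem_ind C _ h)

theorem pv_rnd_nodup (rules : List (String × List (String × Int))) (C F : List String) :
    (pvRnd rules C F).Nodup ∧ ∀ y ∈ pvRnd rules C F, y ∉ C := by
  suffices h : ∀ (F : List String) (ind0 : List String), ind0.Nodup → (∀ y ∈ ind0, y ∉ C) →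
      (F.foldl (fun ind inner => pvSift C ind (pvACands rules inner)) ind0).Nodup ∧
      ∀ y ∈ F.foldl (fun ind inner => pvSift C ind (pvACands rules inner)) ind0, y ∉ C by
    exact h F [] (by simp) (by simp)
  intro F
  induction F with
  | nil => intro ind0 h1 h2; exact ⟨h1, h2⟩
  | cons f F ih =>
    intro ind0 h1 h2
    have := pv_sift_nodup C (pvACands rules f) h1 h2
    exact ih _ this.1 this.2

theorem pv_rnd_closure (rules : List (String × List (String × Int))) (C : List String)
    {F : List String} {inner x : String} (hF : inner ∈ F) (hx : x ∈ pvACands rules inner) :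
    x ∈ C ∨ x ∈ pvRnd rules C F := by
  suffices h : ∀ (F : List String) (ind0 : List String), inner ∈ F →
      x ∈ C ∨ x ∈ F.foldl (fun ind inner => pvSift C ind (pvACands rules inner)) ind0 by
    exact h F [] hF
  intro F
  induction F with
  | nil => intro _ h; simp at h
  | cons f F ih =>
    intro ind0 h
    rcases List.mem_cons.mp h with h' | h'
    · subst h'
      rcases pv_sift_mem_of_mem_xs C ind0 hx with h'' | h''
      · exact Or.inl h''
      · exact Or.inr (pv_rnd_go_mono rules C F h'')
    · exact ih _ h'

-- A's inner scan over the rules is a sift of pvACands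
theorem pv_ainner (rules : List (String × List (String × Int))) (C : List String)
    (inner : String) (ind : List String) :
    rules.foldl
      (fun ind p =>
        if pvHasKey p.2 inner && !(PySem.Set.contains C p.1) then PySem.Set.add ind p.1
        else ind) ind
      = pvSift C ind (pvACands rules inner) := by
  induction rules generalizing ind with
  | nil => rfl
  | cons p rs ih =>
    simp only [List.foldl_cons]
    have hstep : (if pvHasKey p.2 inner && !(PySem.Set.contains C p.1) then PySem.Set.add ind p.1
        else ind)
        = if pvHasKey p.2 inner then (if p.1 ∈ C ∨ p.1 ∈ ind then ind else ind ++ [p.1]) else ind := by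
      by_cases hk : pvHasKey p.2 inner = true <;> by_cases hc : p.1 ∈ C <;>
        by_cases hi : p.1 ∈ ind <;>
        simp [PySem.Set.add, PySem.Set.contains, hk, hc, hi]
    rw [hstep]
    by_cases hk : pvHasKey p.2 inner = true
    · have hcands : pvACands (p :: rs) inner = p.1 :: pvACands rs inner := by
        simp [pvACands, hk]
      rw [hcands, pv_sift_cons, if_pos hk]
      exact ih _
    · have hcands : pvACands (p :: rs) inner = pvACands rs inner := by
        simp [pvACands, hk]
      rw [hcands, if_neg hk]
      exact ih ind

theorem pv_indirect_eq (rules : List (String × List (String × Int)))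
    {C old F : List String} (hC : C = old ++ F)
    (hcov : ∀ inner ∈ old, ∀ x ∈ pvACands rules inner, x ∈ C) :
    pvIndirect rules C = pvRnd rules C F := by
  subst hC
  have hfun : pvIndirect rules (old ++ F)
      = (old ++ F).foldl (fun ind inner => pvSift (old ++ F) ind (pvACands rules inner)) [] := by
    simp only [pvIndirect, PySem.Set.empty]
    congr 1
    funext ind inner
    exact pv_ainner rules (old ++ F) inner ind
  rw [hfun, List.foldl_append]
  have hold : ∀ (old' : List String), (∀ inner ∈ old', ∀ x ∈ pvACands rules inner, x ∈ old ++ F) →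
      old'.foldl (fun ind inner => pvSift (old ++ F) ind (pvACands rules inner)) [] = [] := by
    intro old'
    induction old' with
    | nil => intro _; rfl
    | cons o os ih =>
      intro h
      simp only [List.foldl_cons]
      rw [pv_sift_covered (old ++ F) [] (h o List.mem_cons_self)]
      exact ih (fun z hz => h z (List.mem_cons_of_mem _ hz))
  rw [hold old hcov]
  rfl

-- rev.getD: contributions of every rule, in order, with one copy of p.1 per matching bag entry
theorem pv_rev_getD (rules : List (String × List (String × Int))) (inner : String) :
    (pvRev rules).getD inner []
      = rules.flatMap (fun p => ((p.2.filter (fun q => q.1 == inner)).map (fun _ => p.1))) := by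
  suffices h : ∀ (rs : List (String × List (String × Int))) (d : PySem.Dict String (List String)),
      (rs.foldl (fun d p => p.2.foldl (fun d q => d.modify q.1 [] (fun l => l ++ [p.1])) d) d).getD inner []
      = d.getD inner [] ++ rs.flatMap (fun p => ((p.2.filter (fun q => q.1 == inner)).map (fun _ => p.1))) by
    simpa [pvRev] using h rules PySem.Dict.empty
  intro rs
  induction rs with
  | nil => intro d; simp
  | cons p rs ih =>
    intro d
    simp only [List.foldl_cons, List.flatMap_cons]
    rw [ih]
    have hstep : (p.2.foldl (fun d q => d.modify q.1 [] (fun l => l ++ [p.1])) d).getD inner []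
        = d.getD inner [] ++ (p.2.filter (fun q => q.1 == inner)).map (fun _ => p.1) := by
      have hmap : p.2.foldl (fun d q => d.modify q.1 [] (fun l => l ++ [p.1])) d
          = (p.2.map (fun q => (q.1, p.1))).foldl (fun d pr => d.modify pr.1 [] (fun l => l ++ [pr.2])) d := by
        rw [List.foldl_map]
      rw [hmap, PySem.Dict.getD_foldl_modify_append]
      congr 1
      rw [List.filter_map, List.map_map]
      rfl
    rw [hstep, List.append_assoc]

theorem pv_sift_stable (C : List String) {ind : List String} {x : String}
    (h : x ∈ C ∨ x ∈ ind) (k : Nat) :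
    pvSift C ind (List.replicate k x) = ind := by
  induction k with
  | zero => rfl
  | succ k ih =>
    rw [List.replicate_succ, pv_sift_cons, if_pos h]
    exact ih

theorem pv_sift_replicate (C : List String) (ind : List String) (x : String) (k : Nat) :
    pvSift C ind (List.replicate (k + 1) x) = pvSift C ind [x] := by
  rw [List.replicate_succ, pv_sift_cons]
  have hone : pvSift C ind [x] = if x ∈ C ∨ x ∈ ind then ind else ind ++ [x] := by
    rw [show [x] = x :: ([] : List String) from rfl, pv_sift_cons, pv_sift_nil]
  rw [hone]
  by_cases hc : x ∈ C ∨ x ∈ ind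
  · rw [if_pos hc]
    exact pv_sift_stable C hc k
  · rw [if_neg hc]
    exact pv_sift_stable C (Or.inr (by simp)) k

-- duplicate collapse: sifting B's rev list equals sifting A's candidate list
theorem pv_dupcollapse (rules : List (String × List (String × Int))) (C : List String)
    (inner : String) (ind : List String) :
    pvSift C ind (rules.flatMap (fun p => ((p.2.filter (fun q => q.1 == inner)).map (fun _ => p.1))))
      = pvSift C ind (pvACands rules inner) := by
  induction rules generalizing ind with
  | nil => rfl
  | cons p rs ih =>
    simp only [List.flatMap_cons]
    rw [pv_sift_append]
    have hblock : (p.2.filter (fun q => q.1 == inner)).map (fun _ => p.1)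
        = List.replicate (p.2.filter (fun q => q.1 == inner)).length p.1 := by
      simp [List.map_const']
    by_cases hk : pvHasKey p.2 inner = true
    · have hne : p.2.filter (fun q => q.1 == inner) ≠ [] := by
        intro hnil
        have : pvHasKey p.2 inner = false := by
          rw [pvHasKey, List.any_eq_false]
          intro q hq
          simpa using List.filter_eq_nil_iff.mp hnil q hq
        rw [this] at hk; cases hk
      obtain ⟨k, hkk⟩ : ∃ k, (p.2.filter (fun q => q.1 == inner)).length = k + 1 := by
        rcases hlen : (p.2.filter (fun q => q.1 == inner)).length with _ | k
        · exact absurd (List.length_eq_zero_iff.mp hlen) hne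
        · exact ⟨k, hlen⟩
      rw [hblock, hkk, pv_sift_replicate]
      have hcands : pvACands (p :: rs) inner = p.1 :: pvACands rs inner := by
        simp [pvACands, hk]
      rw [hcands]
      rw [show (p.1 :: pvACands rs inner) = [p.1] ++ pvACands rs inner from rfl, pv_sift_append]
      exact ih _
    · have hnil : p.2.filter (fun q => q.1 == inner) = [] := by
        rw [List.filter_eq_nil_iff]
        intro q hq
        have hkf : pvHasKey p.2 inner = false := by
          cases hb : pvHasKey p.2 inner
          · rfl
          · exact absurd hb hk
        have := List.any_eq_false.mp hkf q hq
        simpa using this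
      rw [hnil]
      simp only [List.map_nil, pv_sift_nil]
      have hcands : pvACands (p :: rs) inner = pvACands rs inner := by
        simp [pvACands, hk]
      rw [hcands]
      exact ih ind

-- B's inner scan of one adjacency list, in sift form
theorem pv_binner (C : List String)
    (xs : List String) (new : List String) :
    xs.foldl
      (fun st container =>
        if !(PySem.Set.contains st.1 container) then
          (PySem.Set.add st.1 container, st.2 ++ [container])
        else st)
      (C ++ new, new)
      = (C ++ pvSift C new xs, pvSift C new xs) := by
  induction xs generalizing new with
  | nil => rfl
  | cons x xs ih =>
    simp only [List.foldl_cons]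
    rw [pv_sift_cons]
    by_cases hx : x ∈ C ∨ x ∈ new
    · have hc : PySem.Set.contains (C ++ new) x = true := by
        simp [PySem.Set.contains, List.mem_append]
        exact hx
      rw [hc]
      simp only [Bool.not_true, Bool.false_eq_true, if_false, if_pos hx]
      exact ih new
    · have hc : PySem.Set.contains (C ++ new) x = false := by
        simp [PySem.Set.contains, List.mem_append]
        tauto
      rw [hc]
      have hadd : PySem.Set.add (C ++ new) x = C ++ (new ++ [x]) := by
        rw [pv_add_eq, if_neg (by simp [List.mem_append]; tauto), List.append_assoc]
      simp only [Bool.not_false, if_true, hadd, if_neg hx]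
      exact ih (new ++ [x])

-- B's whole round, in sift form
theorem pv_bround (rules : List (String × List (String × Int))) (C F : List String) :
    pvBfsRound (pvRev rules) C F = (C ++ pvRnd rules C F, pvRnd rules C F) := by
  suffices h : ∀ (F new : List String),
      F.foldl
        (fun st inner =>
          ((pvRev rules).getD inner []).foldl
            (fun st container =>
              if !(PySem.Set.contains st.1 container) then
                (PySem.Set.add st.1 container, st.2 ++ [container])
              else st)
            st)
        (C ++ new, new)
      = (C ++ F.foldl (fun ind inner => pvSift C ind (pvACands rules inner)) new,
         F.foldl (fun ind inner => pvSift C ind (pvACands rules inner)) new) by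
    have := h F []
    simpa [pvBfsRound, pvRnd, PySem.Set.empty] using this
  intro F
  induction F with
  | nil => intro new; rfl
  | cons f F ih =>
    intro new
    simp only [List.foldl_cons]
    rw [pv_binner, pv_rev_getD, pv_dupcollapse]
    exact ih (pvSift C new (pvACands rules f))

-- set.update with fresh distinct elements is an append
theorem pv_update_append {C : List String} {ind : List String}
    (h1 : ind.Nodup) (h2 : ∀ y ∈ ind, y ∉ C) :
    PySem.Set.update C ind = C ++ ind := by
  induction ind generalizing C with
  | nil => simp [PySem.Set.update]
  | cons x xs ih =>
    have hadd : PySem.Set.add C x = C ++ [x] := by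
      rw [pv_add_eq, if_neg (h2 x List.mem_cons_self)]
    have hstep : PySem.Set.update C (x :: xs) = PySem.Set.update (C ++ [x]) xs := by
      simp [PySem.Set.update, hadd]
    rw [hstep, ih (List.Nodup.of_cons h1)]
    · simp
    · intro y hy
      simp only [List.mem_append, List.mem_singleton]
      rintro (h' | rfl)
      · exact h2 y (List.mem_cons_of_mem _ hy) h'
      · exact (List.nodup_cons.mp h1).1 hy

theorem pv_measure_le (rules : List (String × List (String × Int))) (C : List String) :
    pvM rules C ≤ rules.length := by
  calc pvM rules C ≤ (rules.map Prod.fst).toFinset.card :=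
        Finset.card_le_card (Finset.sdiff_subset)
    _ ≤ (rules.map Prod.fst).length := List.toFinset_card_le _
    _ = rules.length := by simp

theorem pv_measure_lt (rules : List (String × List (String × Int))) {C ind : List String}
    (hne : ind ≠ [])
    (hsub : ∀ y ∈ ind, y ∉ C ∧ y ∈ rules.map Prod.fst) :
    pvM rules (C ++ ind) < pvM rules C := by
  apply Finset.card_lt_card
  constructor
  · intro y hy
    simp only [Finset.mem_sdiff, List.mem_toFinset, List.mem_append] at hy ⊢
    exact ⟨hy.1, fun h => hy.2 (Or.inl h)⟩
  · intro hsub'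
    obtain ⟨y, hy⟩ := List.exists_mem_of_ne_nil ind hne
    have h1 : y ∈ (rules.map Prod.fst).toFinset \ C.toFinset := by
      simp only [Finset.mem_sdiff, List.mem_toFinset]
      exact ⟨(hsub y hy).2, (hsub y hy).1⟩
    have h2 := hsub' h1
    simp only [Finset.mem_sdiff, List.mem_toFinset, List.mem_append] at h2
    exact h2.2 (Or.inr hy)

-- the initial set comprehension, in sift form
theorem pv_init (rules : List (String × List (String × Int))) (colour : String) :
    rules.foldl (fun s p => if pvHasKey p.2 colour then PySem.Set.add s p.1 else s)
      PySem.Set.empty = pvRnd rules [] [colour] := by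
  have h : ∀ (rs : List (String × List (String × Int))) (s : List String),
      rs.foldl (fun s p => if pvHasKey p.2 colour then PySem.Set.add s p.1 else s) s
      = pvSift [] s (pvACands rs colour) := by
    intro rs
    induction rs with
    | nil => intro s; rfl
    | cons p rs ih =>
      intro s
      simp only [List.foldl_cons]
      by_cases hk : pvHasKey p.2 colour = true
      · have hcands : pvACands (p :: rs) colour = p.1 :: pvACands rs colour := by
          simp [pvACands, hk]
        rw [hcands, pv_sift_cons, if_pos hk, pv_add_eq]
        by_cases hi : p.1 ∈ s
        · rw [if_pos hi, if_pos (Or.inr hi)]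
          exact ih s
        · rw [if_neg hi, if_neg (by simp [hi])]
          exact ih _
      · have hcands : pvACands (p :: rs) colour = pvACands rs colour := by
          simp [pvACands, hk]
        rw [hcands, if_neg hk]
        exact ih s
  have := h rules []
  simpa [pvRnd, PySem.Set.empty] using this

-- main loop correspondence
theorem pv_main (rules : List (String × List (String × Int))) :
    ∀ (fuel : Nat) (C F old : List String), C = old ++ F →
      (∀ inner ∈ old, ∀ x ∈ pvACands rules inner, x ∈ C) →
      pvM rules C + 1 ≤ fuel →
      pvLoopA rules fuel C = pvLoopB (pvRev rules) (fuel + 1) C F := by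
  intro fuel
  induction fuel with
  | zero => intro C F old _ _ hm; omega
  | succ fuel ih =>
    intro C F old hC hcov hm
    have hind : pvIndirect rules C = pvRnd rules C F := pv_indirect_eq rules hC hcov
    have hnod := pv_rnd_nodup rules C F
    have hupd : PySem.Set.update C (pvRnd rules C F) = C ++ pvRnd rules C F :=
      pv_update_append hnod.1 hnod.2
    have hBstep : pvLoopB (pvRev rules) (fuel + 1 + 1) C F
        = if F.isEmpty then C
          else pvLoopB (pvRev rules) (fuel + 1) (C ++ pvRnd rules C F) (pvRnd rules C F) := by
      simp only [pvLoopB, pv_bround]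
    by_cases hF : F.isEmpty = true
    · -- frontier empty: the round collects nothing and both sides stop with C
      have hFnil : F = [] := by simpa using hF
      rw [hBstep, if_pos hF]
      have hrnil : pvRnd rules C F = [] := by rw [hFnil]; rfl
      simp only [pvLoopA, hind, hrnil]
      simp
    · rw [hBstep, if_neg hF]
      simp only [pvLoopA, hind, hupd]
      by_cases hie : (pvRnd rules C F).isEmpty = true
      · -- round empty: both sides stop with C
        rw [if_pos hie]
        have hrnil : pvRnd rules C F = [] := by simpa using hie
        rw [hrnil]
        simp [pvLoopB]
      · -- round productive: recurse on both sides
        rw [if_neg hie]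
        have hne : pvRnd rules C F ≠ [] := by
          intro h; rw [h] at hie; simp at hie
        have hsub : ∀ y ∈ pvRnd rules C F, y ∉ C ∧ y ∈ rules.map Prod.fst := by
          intro y hy
          rcases pv_rnd_go_subset rules C [] hy with h' | h'
          · simp at h'
          · exact ⟨h'.1, h'.2⟩
        have hlt := pv_measure_lt rules hne hsub
        apply ih (C ++ pvRnd rules C F) (pvRnd rules C F) C rfl ?_ (by omega)
        intro inner hinner x hx
        rcases (by rw [hC] at hinner; exact List.mem_append.mp hinner : inner ∈ old ∨ inner ∈ F) with h' | h'
        · exact List.mem_append.mpr (Or.inl (hcov inner h' x hx))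
        · rcases pv_rnd_closure rules C h' hx with h'' | h''
          · exact List.mem_append.mpr (Or.inl h'')
          · exact List.mem_append.mpr (Or.inr h'')

-- ===== VERDICT (by name: the statement is the Claim_ definition above) =====
theorem colour_containers_spec : Claim_equal_colour_containers := by
  intro colour rules _
  unfold Spec_colour_containers colour_containers colour_containers_alt
  rw [pv_init]
  have hB1 : pvLoopB (pvRev rules) (rules.length + 3) PySem.Set.empty [colour]
      = pvLoopB (pvRev rules) (rules.length + 2) (pvRnd rules [] [colour]) (pvRnd rules [] [colour]) := by
    have hrd : pvBfsRound (pvRev rules) [] [colour]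
        = ([] ++ pvRnd rules [] [colour], pvRnd rules [] [colour]) := pv_bround rules [] [colour]
    show pvLoopB (pvRev rules) ((rules.length + 2) + 1) PySem.Set.empty [colour] = _
    simp only [pvLoopB, PySem.Set.empty]
    rw [if_neg (by simp)]
    rw [show ([] : PySem.Set String) = ([] : List String) from rfl] at hrd ⊢
    rw [hrd]
    simp
  rw [hB1]
  exact pv_main rules (rules.length + 1) (pvRnd rules [] [colour]) (pvRnd rules [] [colour]) []
    (by simp) (by simp) (by have := pv_measure_le rules (pvRnd rules [] [colour]); omega)
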